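-- pv_equiv track=rewrite | github.com/contentswarm177-coder/water-trends-app | scripts/fetch_news.py | apply_domain_cap
-- ===== SOURCE A (Python) =====
-- def apply_domain_cap(articles: list[dict], cap: int) -> list[dict]:
--     """Cap stories per primary domain to prevent one outlet from dominating."""
--     counts: dict[str, int] = {}
--     kept: list[dict] = []
--     for art in sorted(articles, key=lambda a: a.get("published_at") or "", reverse=True):
--         domain = art.get("domain") or ""
--         if counts.get(domain, 0) >= cap:
--             continue
--         counts[domain] = counts.get(domain, 0) + 1
--         kept.append(art)
--     return kept
-- ===== SOURCE B (Python) =====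
-- def apply_domain_cap(articles: list, cap: int) -> list:
--     """Cap stories per primary domain to prevent one outlet from dominating."""
--     cap = max(cap, 0)
--     ordered = sorted(articles, key=lambda a: a.get("published_at") or "", reverse=True)
--     groups: dict = {}
--     for i, art in enumerate(ordered):
--         groups.setdefault(art.get("domain") or "", []).append(i)
--     kept: set = set()
--     for idxs in groups.values():
--         kept.update(idxs[:cap])
--     return [art for i, art in enumerate(ordered) if i in kept]
-- ===== Notes on version B (the rewrite author's own statement) =====
-- stated objective: alternative
-- what changed: Replaces the interleaved per-article counting pass (mutable counts dict deciding keep/skip on the fly) with a group-then-slice-then-merge decomposition: group the sorted articles' positional indices by domain, slice the first cap indices of each group, union them into a kept set, and emit the sorted list filtered by that set.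
import Mathlib
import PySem

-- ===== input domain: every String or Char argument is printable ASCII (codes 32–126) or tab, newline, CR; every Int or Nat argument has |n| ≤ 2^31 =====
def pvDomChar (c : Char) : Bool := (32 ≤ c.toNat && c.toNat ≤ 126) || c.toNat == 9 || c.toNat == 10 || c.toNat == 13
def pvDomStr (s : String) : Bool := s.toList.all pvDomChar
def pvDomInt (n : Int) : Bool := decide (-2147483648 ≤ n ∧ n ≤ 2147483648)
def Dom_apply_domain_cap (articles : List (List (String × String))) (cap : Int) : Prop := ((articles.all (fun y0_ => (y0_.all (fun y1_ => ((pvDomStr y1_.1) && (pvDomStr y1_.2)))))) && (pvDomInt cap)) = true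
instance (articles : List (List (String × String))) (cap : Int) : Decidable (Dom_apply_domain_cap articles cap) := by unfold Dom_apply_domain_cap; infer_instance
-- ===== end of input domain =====

-- B replaces A's interleaved counting pass by a group-then-slice-then-merge decomposition
-- (group sorted indices by domain, take the first cap per group, filter by the kept index set); alternative, same cost.

-- helpers shared by both ports: `a.get("published_at") or ""` and `art.get("domain") or ""`
-- (`x or ""` on an Optional[str]: None and "" both give "", so it is `.getD ""`)
def artKey (a : List (String × String)) : String := ((PySem.Dict.mk a).get? "published_at").getD ""
def artDom (a : List (String × String)) : String := ((PySem.Dict.mk a).get? "domain").getD ""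

-- ===== PORT A =====
def apply_domain_cap (articles : List (List (String × String))) (cap : Int) : List (List (String × String)) :=
  ((PySem.List.sorted articles artKey true).foldl
    (fun st art =>
      if cap ≤ st.1.getD (artDom art) 0 then st
      else (st.1.insert (artDom art) (st.1.getD (artDom art) 0 + 1), st.2 ++ [art]))
    ((PySem.Dict.empty : PySem.Dict String Int), ([] : List (List (String × String))))).2

-- ===== PORT B =====
-- transliteration of Source B: clamp cap, sort, group positional indices by domain,
-- keep the first cap indices of each group as a set, filter the sorted list by it.
-- idxs[:c] with the clamped 0 ≤ c is List.take c.toNat (exact: nonnegative upper-bound slice).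
def apply_domain_cap_alt (articles : List (List (String × String))) (cap : Int) : List (List (String × String)) :=
  let c : Int := max cap 0
  let ordered := PySem.List.sorted articles artKey true
  let groups : PySem.Dict String (List Int) :=
    (PySem.List.enumerate ordered 0).foldl
      (fun g p => g.modify (artDom p.2) [] (· ++ [p.1])) PySem.Dict.empty
  let kept : PySem.Set Int :=
    groups.values.foldl (fun s idxs => PySem.Set.update s (idxs.take c.toNat)) PySem.Set.empty
  ((PySem.List.enumerate ordered 0).filter (fun p => PySem.Set.contains kept p.1)).map (·.2)

-- ===== PRECONDITION & SPEC =====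
def Spec_apply_domain_cap (articles : List (List (String × String))) (cap : Int) (out : List (List (String × String))) : Prop := out = apply_domain_cap_alt articles cap
instance (articles : List (List (String × String))) (cap : Int) (out : List (List (String × String))) : Decidable (Spec_apply_domain_cap articles cap out) := by unfold Spec_apply_domain_cap; infer_instance

-- ===== CLAIM (what is proved, stated in full; the proofs are below) =====
def Claim_equal_apply_domain_cap : Prop := ∀ (articles : List (List (String × String))) (cap : Int), Dom_apply_domain_cap articles cap → Spec_apply_domain_cap articles cap (apply_domain_cap articles cap)

-- ===== LEMMAS AND PROOFS =====

-- number of articles with domain d among `seen`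
def pvCnt (seen : List (List (String × String))) (d : String) : Nat :=
  seen.countP (fun b => artDom b == d)

-- common characterisation: keep an article iff fewer than cap same-domain articles precede it (in sorted order)
def pvKeep (cap : Int) (seen : List (List (String × String))) :
    List (List (String × String)) → List (List (String × String))
  | [] => []
  | a :: t =>
    if (pvCnt seen (artDom a) : Int) < cap then a :: pvKeep cap (seen ++ [a]) t
    else pvKeep cap (seen ++ [a]) t

-- B-side proof path
def pvGroups (ys : List (List (String × String))) : PySem.Dict String (List Int) :=
  (PySem.List.enumerate ys 0).foldl
    (fun g p => g.modify (artDom p.2) [] (· ++ [p.1])) PySem.Dict.empty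

def pvKeptSet (cap : Int) (ys : List (List (String × String))) : PySem.Set Int :=
  (pvGroups ys).values.foldl
    (fun s idxs => PySem.Set.update s (idxs.take (max cap 0).toNat)) PySem.Set.empty

theorem pvCnt_append (seen : List (List (String × String))) (a : List (String × String)) (d : String) :
    pvCnt (seen ++ [a]) d = pvCnt seen d + (if artDom a = d then 1 else 0) := by
  simp [pvCnt, List.countP_append, List.countP_cons]

theorem pvA_loop (cap : Int) (ys : List (List (String × String)))
    (counts : PySem.Dict String Int) (kept seen : List (List (String × String)))
    (hinv : ∀ d, counts.getD d 0 = min (pvCnt seen d : Int) (max cap 0)) :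
    (ys.foldl
      (fun st art =>
        if cap ≤ st.1.getD (artDom art) 0 then st
        else (st.1.insert (artDom art) (st.1.getD (artDom art) 0 + 1), st.2 ++ [art]))
      (counts, kept)).2 = kept ++ pvKeep cap seen ys := by
  induction ys generalizing counts kept seen with
  | nil => simp [pvKeep]
  | cons a t ih =>
    simp only [List.foldl_cons, pvKeep]
    by_cases hk : (pvCnt seen (artDom a) : Int) < cap
    · have hlt : ¬ cap ≤ counts.getD (artDom a) 0 := by
        rw [hinv]; omega
      rw [if_neg hlt, if_pos hk]
      rw [ih _ _ (seen ++ [a]) ?_]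
      · simp
      · intro d
        rw [PySem.Dict.getD_insert, pvCnt_append]
        have h1 := hinv d
        have h2 := hinv (artDom a)
        by_cases h : d = artDom a
        · subst h
          rw [if_pos rfl, if_pos rfl]
          push_cast
          omega
        · rw [if_neg h, if_neg (fun hc => h hc.symm), h1]
          push_cast
          omega
    · have hge : cap ≤ counts.getD (artDom a) 0 := by
        rw [hinv]; omega
      rw [if_pos hge, if_neg hk]
      rw [ih _ _ (seen ++ [a]) ?_]
      intro d
      rw [hinv d, pvCnt_append]
      have h2 := hinv (artDom a)
      by_cases h : artDom a = d
      · subst h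
        rw [if_pos rfl]
        push_cast
        omega
      · rw [if_neg h]
        push_cast
        omega

theorem pvA_eq (articles : List (List (String × String))) (cap : Int) :
    apply_domain_cap articles cap = pvKeep cap [] (PySem.List.sorted articles artKey true) := by
  unfold apply_domain_cap
  rw [pvA_loop cap _ _ _ [] (fun d => by simp [PySem.Dict.getD_empty, pvCnt])]
  simp

theorem pvAlt_eq_filter (articles : List (List (String × String))) (cap : Int) :
    apply_domain_cap_alt articles cap =
      ((PySem.List.enumerate (PySem.List.sorted articles artKey true) 0).filter
        (fun p => PySem.Set.contains (pvKeptSet cap (PySem.List.sorted articles artKey true)) p.1)).map (·.2) := rfl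

-- groups as a fold over (domain, index) pairs

theorem pvGroups_eq (ys : List (List (String × String))) :
    pvGroups ys = ((PySem.List.enumerate ys 0).map (fun p => (artDom p.2, p.1))).foldl
      (fun g p => g.modify p.1 [] (· ++ [p.2])) PySem.Dict.empty := by
  rw [List.foldl_map]; rfl

theorem pvGroups_getD (ys : List (List (String × String))) (d : String) :
    (pvGroups ys).getD d [] =
      (((PySem.List.enumerate ys 0).map (fun p => (artDom p.2, p.1))).filter
        (fun p => p.1 == d)).map (·.2) := by
  rw [pvGroups_eq, PySem.Dict.getD_foldl_modify_append]
  simp [PySem.Dict.getD_empty]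

theorem pvGroups_nodup (ys : List (List (String × String))) :
    (pvGroups ys).keys.Nodup := by
  unfold pvGroups
  exact PySem.Dict.nodup_keys_foldl_modify_key _ (fun (p : Int × List (String × String)) => artDom p.2) _ _ _ PySem.Dict.nodup_keys_empty

-- membership in a fold of set-updates

theorem pvMem_fold_update (vals : List (List Int)) (s : PySem.Set Int) (t : Nat) (i : Int) :
    (i ∈ vals.foldl (fun s idxs => PySem.Set.update s (idxs.take t)) s) ↔
      i ∈ s ∨ ∃ l ∈ vals, i ∈ l.take t := by
  induction vals generalizing s with
  | nil => simp
  | cons v vs ih =>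
    simp only [List.foldl_cons, ih, PySem.Set.mem_update, List.mem_cons]
    constructor
    · rintro ((h | h) | ⟨l, hl, h⟩)
      · exact Or.inl h
      · exact Or.inr ⟨v, Or.inl rfl, h⟩
      · exact Or.inr ⟨l, Or.inr hl, h⟩
    · rintro (h | ⟨l, (rfl | hl), h⟩)
      · exact Or.inl (Or.inl h)
      · exact Or.inl (Or.inr h)
      · exact Or.inr ⟨l, hl, h⟩

theorem pvGrpTake (ys : List (List (String × String))) (k i : Int) (t : Nat) (d : String) :
    (i ∈ ((((PySem.List.enumerate ys k).map (fun p => (artDom p.2, p.1))).filter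
        (fun p => p.1 == d)).map (·.2)).take t) ↔
      ∃ (j : Nat) (h : j < ys.length), i = k + j ∧ artDom ys[j] = d ∧ pvCnt (ys.take j) d < t := by
  induction ys generalizing k t with
  | nil => simp [PySem.List.enumerate_nil]
  | cons a rest ih =>
    rw [PySem.List.enumerate_cons]
    simp only [List.map_cons, List.filter_cons]
    by_cases hd : artDom a = d
    · simp only [hd, beq_self_eq_true, if_pos]
      cases t with
      | zero =>
        simp only [List.take_zero, List.not_mem_nil, false_iff]
        rintro ⟨j, hj, _, _, hc⟩; omega
      | succ s =>
        simp only [List.map_cons, List.take_succ_cons, List.mem_cons, ih (k+1) s]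
        constructor
        · rintro (rfl | ⟨j, hj, rfl, hdom, hc⟩)
          · exact ⟨0, by simp, by simp, by simpa using hd, by simp [pvCnt]⟩
          · refine ⟨j + 1, by simpa using hj, by push_cast; ring, by simpa using hdom, ?_⟩
            simp only [List.take_succ_cons, pvCnt, List.countP_cons]
            simp only [pvCnt] at hc
            simp [hd]
            omega
        · rintro ⟨j, hj, rfl, hdom, hc⟩
          cases j with
          | zero => exact Or.inl (by push_cast; ring)
          | succ j' =>
            refine Or.inr ⟨j', by simpa using hj, by push_cast; ring, by simpa using hdom, ?_⟩
            simp only [List.take_succ_cons, pvCnt, List.countP_cons] at hc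
            simp only [pvCnt]
            simp [hd] at hc
            omega
    · have hbeq : (artDom a == d) = false := by simpa using hd
      simp only [hbeq, if_neg, Bool.false_eq_true, not_false_iff, ih (k+1) t]
      constructor
      · rintro ⟨j, hj, rfl, hdom, hc⟩
        refine ⟨j + 1, by simpa using hj, by push_cast; ring, by simpa using hdom, ?_⟩
        simp only [List.take_succ_cons, pvCnt, List.countP_cons]
        simp [hbeq]
        simpa [pvCnt] using hc
      · rintro ⟨j, hj, rfl, hdom, hc⟩
        cases j with
        | zero => simp at hdom; exact absurd hdom hd
        | succ j' =>
          refine ⟨j', by simpa using hj, by push_cast; ring, by simpa using hdom, ?_⟩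
          simp only [List.take_succ_cons, pvCnt, List.countP_cons] at hc
          simp [hbeq] at hc
          simpa [pvCnt] using hc

theorem pvLt_toNat (n : Nat) (cap : Int) : (n < (max cap 0).toNat) ↔ ((n : Int) < cap) := by omega

theorem pvMem_keptSet (cap : Int) (ys : List (List (String × String))) (i : Int) :
    PySem.Set.contains (pvKeptSet cap ys) i = true ↔
      ∃ (j : Nat) (h : j < ys.length), i = (j : Int) ∧
        ((pvCnt (ys.take j) (artDom ys[j]) : Int) < cap) := by
  rw [PySem.Set.contains_iff]
  unfold pvKeptSet
  rw [pvMem_fold_update]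
  have hvals : (pvGroups ys).values = (pvGroups ys).keys.map (fun d => (pvGroups ys).getD d []) :=
    PySem.Dict.values_eq_map_keys _ (pvGroups_nodup ys) []
  constructor
  · rintro (h | ⟨l, hl, h⟩)
    · simp [PySem.Set.empty] at h
    · rw [hvals] at hl
      obtain ⟨d, _, rfl⟩ := List.mem_map.mp hl
      rw [pvGroups_getD] at h
      obtain ⟨j, hj, hi, hdom, hc⟩ := (pvGrpTake ys 0 i _ d).mp h
      exact ⟨j, hj, by simpa using hi, by rw [hdom]; exact (pvLt_toNat _ _).mp hc⟩
  · rintro ⟨j, hj, rfl, hc⟩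
    right
    set d := artDom ys[j] with hd
    refine ⟨(pvGroups ys).getD d [], ?_, ?_⟩
    · rw [hvals]
      apply List.mem_map_of_mem
      rw [← PySem.Dict.contains_iff_mem_keys]
      by_contra hnc
      have hnc' : (pvGroups ys).contains d = false := by
        cases h : (pvGroups ys).contains d
        · rfl
        · exact absurd h hnc
      have hget : (pvGroups ys).getD d [] = [] := PySem.Dict.getD_of_not_contains _ _ hnc'
      have hmem := (pvGrpTake ys 0 (j : Int) ((max cap 0).toNat) d).mpr
        ⟨j, hj, by simp, rfl, (pvLt_toNat _ _).mpr hc⟩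
      rw [pvGroups_getD] at hget
      rw [hget] at hmem  -- hmm hmem is about the filter expr; hget rewrites that to []
      simp at hmem
    · rw [pvGroups_getD]
      exact (pvGrpTake ys 0 (j : Int) _ d).mpr ⟨j, hj, by simp, rfl, (pvLt_toNat _ _).mpr hc⟩

theorem pvTake_left (seen suffix : List (List (String × String))) :
    (seen ++ suffix).take seen.length = seen := by
  simp

theorem pvFilter_loop (cap : Int) (ys : List (List (String × String))) (q : Int → Bool)
    (hq : ∀ i, q i = true ↔ ∃ (j : Nat) (h : j < ys.length), i = (j : Int) ∧
        ((pvCnt (ys.take j) (artDom ys[j]) : Int) < cap)) :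
    ∀ (suffix seen : List (List (String × String))), ys = seen ++ suffix →
      ((PySem.List.enumerate suffix (seen.length : Int)).filter (fun p => q p.1)).map (·.2) =
        pvKeep cap seen suffix := by
  intro suffix
  induction suffix with
  | nil => intro seen _; simp [PySem.List.enumerate_nil, pvKeep]
  | cons a rest ih =>
    intro seen hys
    rw [PySem.List.enumerate_cons]
    have hlen : seen.length < ys.length := by rw [hys]; simp
    have hget : ys[seen.length]'hlen = a := by
      subst hys; simp
    have htake : ys.take seen.length = seen := by rw [hys]; exact pvTake_left _ _
    have hqhead : q (seen.length : Int) = true ↔ ((pvCnt seen (artDom a) : Int) < cap) := by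
      rw [hq]
      constructor
      · rintro ⟨j, hj, hji, hc⟩
        have : j = seen.length := by omega
        subst this
        rwa [htake, hget] at hc
      · intro hc
        exact ⟨seen.length, hlen, rfl, by rwa [htake, hget]⟩
    have hrec := ih (seen ++ [a]) (by simpa using hys)
    simp only [List.length_append, List.length_cons, List.length_nil] at hrec
    simp only [List.filter_cons]
    by_cases hk : (pvCnt seen (artDom a) : Int) < cap
    · rw [if_pos (hqhead.mpr hk)]
      simp only [List.map_cons, pvKeep, if_pos hk]
      rw [← hrec]
      norm_num
    · have : ¬ q (seen.length : Int) = true := fun h => hk (hqhead.mp h)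
      rw [if_neg this]
      simp only [pvKeep, if_neg hk]
      rw [← hrec]
      norm_num

theorem pvB_eq (articles : List (List (String × String))) (cap : Int) :
    apply_domain_cap_alt articles cap = pvKeep cap [] (PySem.List.sorted articles artKey true) := by
  rw [pvAlt_eq_filter]
  have := pvFilter_loop cap (PySem.List.sorted articles artKey true)
    (fun i => PySem.Set.contains (pvKeptSet cap (PySem.List.sorted articles artKey true)) i)
    (fun i => pvMem_keptSet cap _ i)
    (PySem.List.sorted articles artKey true) [] (by simp)
  simpa using this

-- ===== VERDICT (by name: the statement is the Claim_ definition above) =====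
theorem apply_domain_cap_spec : Claim_equal_apply_domain_cap := by
  intro articles cap _
  unfold Spec_apply_domain_cap
  rw [pvA_eq, pvB_eq]
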